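-- pv_equiv track=rewrite | github.com/Yousafkhanzadaa/codemem | src/codemem/indexer.py | _extract_js_import_names
-- ===== SOURCE A (Python) =====
-- def _extract_js_import_names(clause: str) -> list[str]:
--     clause = clause.strip()
--     names: list[str] = []
--     if clause.startswith("{") and clause.endswith("}"):
--         items = clause[1:-1].split(",")
--         for item in items:
--             local = item.strip().split(" as ")[-1].strip()
--             if local:
--                 names.append(local)
--         return names
--
--     if "," in clause:
--         default_name, named = clause.split(",", 1)
--         if default_name.strip():
--             names.append(default_name.strip())
--         names.extend(_extract_js_import_names(named.strip()))
--         return names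
--
--     cleaned = clause.replace("* as ", "").strip()
--     if cleaned:
--         names.append(cleaned)
--     return names
-- ===== SOURCE B (Python) =====
-- def _extract_js_import_names(clause: str) -> list[str]:
--     clause = clause.strip()
--     ends_brace = clause.endswith("}")
--     segs = clause.split(",")
--     names: list[str] = []
--     for i, seg in enumerate(segs):
--         s = seg.strip()
--         if s.startswith("{") and ends_brace:
--             inner = ",".join(segs[i:]).strip()[1:-1]
--             for item in inner.split(","):
--                 local = item.strip().split(" as ")[-1].strip()
--                 if local:
--                     names.append(local)
--             return names
--         if i < len(segs) - 1:
--             if s: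
--                 names.append(s)
--         else:
--             cleaned = s.replace("* as ", "").strip()
--             if cleaned:
--                 names.append(cleaned)
--     return names
-- ===== Notes on version B (the rewrite author's own statement) =====
-- stated objective: alternative
-- what changed: B splits the clause on every comma once up front and makes a single indexed scan over the segment list (detecting the brace hand-off per segment via one precomputed ends-with-'}' flag), instead of A's self-recursion that strips and re-splits the remainder one comma at a time.
import Mathlib
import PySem

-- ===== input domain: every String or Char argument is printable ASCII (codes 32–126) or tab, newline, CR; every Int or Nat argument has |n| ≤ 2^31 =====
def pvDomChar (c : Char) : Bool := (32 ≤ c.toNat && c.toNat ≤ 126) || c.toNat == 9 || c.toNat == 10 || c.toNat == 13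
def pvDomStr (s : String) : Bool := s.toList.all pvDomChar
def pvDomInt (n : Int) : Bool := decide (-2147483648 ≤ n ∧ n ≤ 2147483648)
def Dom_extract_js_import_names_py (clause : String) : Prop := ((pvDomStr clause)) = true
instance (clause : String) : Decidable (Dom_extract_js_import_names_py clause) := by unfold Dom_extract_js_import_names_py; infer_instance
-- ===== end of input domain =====

-- B replaces A's self-recursion (peel one comma per call, re-splitting the remainder) with a
-- single up-front split on every comma followed by one indexed scan of the segment list
-- (objective: alternative decomposition, same cost).

-- ===== PORT A =====
-- fuel-based total rendering of A's recursion; fuel = |clause|+1 always suffices because each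
-- recursive call drops at least the consumed comma.  String ops are the PySem.Chars definitions
-- (exact on the domain), applied to the code-point list; String.mk only at the boundary.
def pvAGoC : Nat → List Char → List (List Char)
  | 0, _ => []
  | fuel+1, clause0 =>
    let clause := PySem.Chars.strip clause0
    if PySem.Chars.startswith clause ['{'] && PySem.Chars.endswith clause ['}'] then
      let items := (PySem.Chars.split? (PySem.Chars.slice clause (some 1) (some (-1))) [',']).getD []
      items.foldl (fun names item =>
        let loc := PySem.Chars.strip
          (((PySem.Chars.split? (PySem.Chars.strip item) " as ".toList).getD []).getLastD [])
        if loc = [] then names else names ++ [loc]) []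
    else if PySem.Chars.isIn [','] clause then
      let parts := (PySem.Chars.splitMax? clause [','] 1).getD []
      let default_name := parts.getD 0 []
      let named := parts.getD 1 []
      (if PySem.Chars.strip default_name = [] then [] else [PySem.Chars.strip default_name])
        ++ pvAGoC fuel (PySem.Chars.strip named)
    else
      let cleaned := PySem.Chars.strip (PySem.Chars.replace clause "* as ".toList [])
      if cleaned = [] then [] else [cleaned]

def extract_js_import_names_py (clause : String) : List String :=
  (pvAGoC (clause.toList.length + 1) clause.toList).map String.ofList

-- ===== PORT B =====
-- B's indexed for-loop over the segment list: structural recursion over the remaining segments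
-- (`seg :: rest`; `i == len(segs)-1` is `rest = []`), `names` is the accumulator `acc`,
-- `",".join(segs[i:])` is the join of the remaining segments.
def pvBGoC : List (List Char) → Bool → List (List Char) → List (List Char)
  | [], _, acc => acc
  | seg :: rest, ends_brace, acc =>
    let s := PySem.Chars.strip seg
    if PySem.Chars.startswith s ['{'] && ends_brace then
      let inner := PySem.Chars.slice (PySem.Chars.strip (PySem.Chars.join [','] (seg :: rest)))
        (some 1) (some (-1))
      ((PySem.Chars.split? inner [',']).getD []).foldl (fun names item =>
        let loc := PySem.Chars.strip
          (((PySem.Chars.split? (PySem.Chars.strip item) " as ".toList).getD []).getLastD [])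
        if loc = [] then names else names ++ [loc]) acc
    else
      match rest with
      | [] =>
        let cleaned := PySem.Chars.strip (PySem.Chars.replace s "* as ".toList [])
        if cleaned = [] then acc else acc ++ [cleaned]
      | _ :: _ => pvBGoC rest ends_brace (if s = [] then acc else acc ++ [s])

def extract_js_import_names_py_alt (clause : String) : List String :=
  let c := PySem.Chars.strip clause.toList
  let ends_brace := PySem.Chars.endswith c ['}']
  let segs := (PySem.Chars.split? c [',']).getD []
  (pvBGoC segs ends_brace []).map String.ofList

-- ===== PRECONDITION & SPEC =====
def Spec_extract_js_import_names_py (clause : String) (out : List String) : Prop := out = extract_js_import_names_py_alt clause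
instance (clause : String) (out : List String) : Decidable (Spec_extract_js_import_names_py clause out) := by unfold Spec_extract_js_import_names_py; infer_instance

-- ===== CLAIM (what is proved, stated in full; the proofs are below) =====
def Claim_equal_extract_js_import_names_py : Prop := ∀ (clause : String), Dom_extract_js_import_names_py clause → Spec_extract_js_import_names_py clause (extract_js_import_names_py clause)

-- ===== LEMMAS AND PROOFS =====

-- ---- proof-only split helpers: structural versions of clause.split(",") and split(",", 1) ----
def pvSplAux : List Char → List Char → List (List Char)
  | pre, [] => [pre]
  | pre, c :: r => if c = ',' then pre :: pvSplAux [] r else pvSplAux (pre ++ [c]) r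

def pvSpl1Aux : List Char → List Char → List (List Char)
  | pre, [] => [pre]
  | pre, c :: r => if c = ',' then [pre, r] else pvSpl1Aux (pre ++ [c]) r

theorem pv_go_eq (fuel : Nat) : ∀ (l cur : List Char) (accs : List (List Char)),
    l.length < fuel →
    PySem.Chars.splitOn.go [','] fuel l cur accs = accs.reverse ++ pvSplAux cur.reverse l := by
  induction fuel with
  | zero => intro l cur accs h; omega
  | succ f ih =>
    intro l cur accs h
    cases l with
    | nil => simp [PySem.Chars.splitOn.go, pvSplAux]
    | cons c rest =>
      by_cases hc : c = ','
      · subst hc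
        have hp : List.isPrefixOf [','] (',' :: rest) = true := by
          simp [List.isPrefixOf]
        simp only [PySem.Chars.splitOn.go, hp, if_pos]
        rw [show List.drop [','].length (',' :: rest) = rest from rfl]
        rw [ih rest [] (cur.reverse :: accs) (by simpa using Nat.lt_of_succ_lt_succ h)]
        simp [pvSplAux]
      · have hp : List.isPrefixOf [','] (c :: rest) = false := by
          simp [List.isPrefixOf]; intro h'; exact absurd h'.symm hc
        simp only [PySem.Chars.splitOn.go, hp, Bool.false_eq_true, if_false]
        rw [ih rest (c :: cur) accs (by simpa using Nat.lt_of_succ_lt_succ h)]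
        simp [pvSplAux, hc]

theorem pv_splitOn_eq (l : List Char) : PySem.Chars.splitOn l [','] = pvSplAux [] l := by
  unfold PySem.Chars.splitOn
  rw [pv_go_eq (l.length + 1) l [] [] (by omega)]
  simp

theorem pv_go0 (fuel : Nat) (l cur : List Char) (accs : List (List Char)) :
    PySem.Chars.splitOnMax.go [','] fuel 0 l cur accs = ((cur.reverse ++ l) :: accs).reverse := by
  cases fuel with
  | zero => simp [PySem.Chars.splitOnMax.go]
  | succ f => cases l with
    | nil => simp [PySem.Chars.splitOnMax.go]
    | cons c rest => simp [PySem.Chars.splitOnMax.go]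

theorem pv_go1 (fuel : Nat) : ∀ (l cur : List Char) (accs : List (List Char)),
    l.length < fuel →
    PySem.Chars.splitOnMax.go [','] fuel 1 l cur accs = accs.reverse ++ pvSpl1Aux cur.reverse l := by
  induction fuel with
  | zero => intro l cur accs h; omega
  | succ f ih =>
    intro l cur accs h
    cases l with
    | nil => simp [PySem.Chars.splitOnMax.go, pvSpl1Aux]
    | cons c rest =>
      by_cases hc : c = ','
      · subst hc
        have hp : List.isPrefixOf [','] (',' :: rest) = true := by simp [List.isPrefixOf]
        simp only [PySem.Chars.splitOnMax.go, hp, if_pos, if_false, one_ne_zero]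
        rw [show (1 : Nat) - 1 = 0 by omega]
        rw [show List.drop [','].length (',' :: rest) = rest from rfl]
        rw [pv_go0]
        simp [pvSpl1Aux]
      · have hp : List.isPrefixOf [','] (c :: rest) = false := by
          simp [List.isPrefixOf]; intro h'; exact absurd h'.symm hc
        simp only [PySem.Chars.splitOnMax.go, hp, Bool.false_eq_true, if_false, one_ne_zero]
        rw [ih rest (c :: cur) accs (by simpa using Nat.lt_of_succ_lt_succ h)]
        simp [pvSpl1Aux, hc]

theorem pv_splitOnMax1_eq (l : List Char) :
    PySem.Chars.splitOnMax l [','] 1 = pvSpl1Aux [] l := by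
  unfold PySem.Chars.splitOnMax
  rw [if_neg (by omega)]
  rw [show ((1 : Int).toNat) = 1 from rfl]
  rw [pv_go1 (l.length + 1) l [] [] (by omega)]
  simp

-- ---- pvSplAux facts ----
theorem pvSplAux_ne_nil : ∀ (l pre : List Char), pvSplAux pre l ≠ [] := by
  intro l
  induction l with
  | nil => intro pre; simp [pvSplAux]
  | cons c r ih =>
    intro pre
    by_cases hc : c = ','
    · simp [pvSplAux, hc]
    · simp only [pvSplAux, hc, if_false]
      exact ih _

theorem pvSplAux_no_comma : ∀ (l pre : List Char), ',' ∉ l → pvSplAux pre l = [pre ++ l] := by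
  intro l
  induction l with
  | nil => intro pre _; simp [pvSplAux]
  | cons c r ih =>
    intro pre h
    have hc : c ≠ ',' := fun e => h (e ▸ List.mem_cons_self ..)
    rw [pvSplAux, if_neg hc, ih _ (fun hm => h (List.mem_cons_of_mem _ hm))]
    simp

theorem pvSplAux_append : ∀ (bc : List Char), ',' ∉ bc → ∀ (pre ac : List Char),
    pvSplAux pre (bc ++ ',' :: ac) = (pre ++ bc) :: pvSplAux [] ac := by
  intro bc
  induction bc with
  | nil => intro _ pre ac; simp [pvSplAux]
  | cons c r ih =>
    intro h pre ac
    have hc : c ≠ ',' := fun e => h (e ▸ List.mem_cons_self ..)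
    rw [List.cons_append, pvSplAux, if_neg hc,
      ih (fun hm => h (List.mem_cons_of_mem _ hm)) _ ac]
    simp

theorem pvSpl1Aux_append : ∀ (bc : List Char), ',' ∉ bc → ∀ (pre ac : List Char),
    pvSpl1Aux pre (bc ++ ',' :: ac) = [pre ++ bc, ac] := by
  intro bc
  induction bc with
  | nil => intro _ pre ac; simp [pvSpl1Aux]
  | cons c r ih =>
    intro h pre ac
    have hc : c ≠ ',' := fun e => h (e ▸ List.mem_cons_self ..)
    rw [List.cons_append, pvSpl1Aux, if_neg hc,
      ih (fun hm => h (List.mem_cons_of_mem _ hm)) _ ac]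
    simp

theorem pv_join_pvSplAux : ∀ (l pre : List Char),
    PySem.Chars.join [','] (pvSplAux pre l) = pre ++ l := by
  intro l
  induction l with
  | nil => intro pre; simp [pvSplAux, PySem.Chars.join_singleton]
  | cons c r ih =>
    intro pre
    by_cases hc : c = ','
    · subst hc
      rw [pvSplAux, if_pos rfl]
      cases e : pvSplAux [] r with
      | nil => exact absurd e (pvSplAux_ne_nil r [])
      | cons h t =>
        rw [PySem.Chars.join_cons_cons]
        have := ih []
        rw [e] at this
        rw [this]
        simp
    · rw [pvSplAux, if_neg hc, ih (pre ++ [c])]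
      simp

-- ---- strip toolbox ----
theorem pv_lstrip_append (x y : List Char) (h : PySem.Chars.lstrip y = y) :
    PySem.Chars.lstrip (x ++ y) = PySem.Chars.lstrip x ++ y := by
  unfold PySem.Chars.lstrip at *
  rw [List.dropWhile_append]
  split_ifs with he
  · rw [h, List.isEmpty_iff.mp he]; simp
  · rfl

theorem pv_lstrip_cons_nonspace {c : Char} (hc : PySem.Chars.isspace c = false) (t : List Char) :
    PySem.Chars.lstrip (c :: t) = c :: t := by
  simp [PySem.Chars.lstrip, hc]

theorem pv_rstrip_eq_reverse (l : List Char) :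
    PySem.Chars.rstrip l = (PySem.Chars.lstrip l.reverse).reverse := rfl

theorem pv_rstrip_append (x y : List Char) (h : PySem.Chars.rstrip x = x) :
    PySem.Chars.rstrip (x ++ y) = x ++ PySem.Chars.rstrip y := by
  have hx : PySem.Chars.lstrip x.reverse = x.reverse := by
    have := congrArg List.reverse h
    rw [pv_rstrip_eq_reverse] at this
    simpa using this
  rw [pv_rstrip_eq_reverse, List.reverse_append, pv_lstrip_append _ _ hx]
  rw [List.reverse_append, ← pv_rstrip_eq_reverse]
  simp

theorem pv_rstrip_concat_nonspace {c : Char} (hc : PySem.Chars.isspace c = false) (w : List Char) :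
    PySem.Chars.rstrip (w ++ [c]) = w ++ [c] := by
  rw [pv_rstrip_eq_reverse, List.reverse_append]
  simp only [List.reverse_cons, List.reverse_nil, List.nil_append, List.singleton_append]
  rw [pv_lstrip_cons_nonspace hc]
  simp

theorem pv_lstrip_idem (l : List Char) :
    PySem.Chars.lstrip (PySem.Chars.lstrip l) = PySem.Chars.lstrip l :=
  List.dropWhile_idempotent PySem.Chars.isspace l

theorem pv_rstrip_idem (l : List Char) :
    PySem.Chars.rstrip (PySem.Chars.rstrip l) = PySem.Chars.rstrip l := by
  rw [pv_rstrip_eq_reverse, pv_rstrip_eq_reverse l]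
  simp [pv_lstrip_idem]

theorem pv_lstrip_of_all_space {l : List Char} (h : ∀ c ∈ l, PySem.Chars.isspace c = true) :
    PySem.Chars.lstrip l = [] :=
  List.dropWhile_eq_nil_iff.mpr h

theorem pv_rstrip_of_all_space {l : List Char} (h : ∀ c ∈ l, PySem.Chars.isspace c = true) :
    PySem.Chars.rstrip l = [] := by
  rw [pv_rstrip_eq_reverse, pv_lstrip_of_all_space (by simpa using h)]
  rfl

theorem pv_lstrip_head (l : List Char) :
    PySem.Chars.lstrip l = [] ∨
      ∃ d t, PySem.Chars.lstrip l = d :: t ∧ PySem.Chars.isspace d = false := by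
  induction l with
  | nil => exact Or.inl rfl
  | cons c t ih =>
    cases hsp : PySem.Chars.isspace c with
    | true =>
      have : PySem.Chars.lstrip (c :: t) = PySem.Chars.lstrip t := by
        simp [PySem.Chars.lstrip, hsp]
      rw [this]; exact ih
    | false => exact Or.inr ⟨c, t, pv_lstrip_cons_nonspace hsp t, hsp⟩

theorem pv_rstrip_last (l : List Char) :
    PySem.Chars.rstrip l = [] ∨
      ∃ w d, PySem.Chars.rstrip l = w ++ [d] ∧ PySem.Chars.isspace d = false := by
  rcases pv_lstrip_head l.reverse with h | ⟨d, t, h, hd⟩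
  · left; rw [pv_rstrip_eq_reverse, h]; rfl
  · right
    exact ⟨t.reverse, d, by rw [pv_rstrip_eq_reverse, h]; simp, hd⟩

theorem pv_rstrip_decomp (l : List Char) :
    ∃ sp, l = PySem.Chars.rstrip l ++ sp ∧ ∀ c ∈ sp, PySem.Chars.isspace c = true := by
  refine ⟨(List.takeWhile PySem.Chars.isspace l.reverse).reverse, ?_, ?_⟩
  · conv_lhs => rw [← List.reverse_reverse l, ← List.takeWhile_append_dropWhile
      (p := PySem.Chars.isspace) (l := l.reverse)]
    rw [List.reverse_append, pv_rstrip_eq_reverse]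
    rfl
  · intro c hc
    rw [List.mem_reverse] at hc
    exact List.mem_takeWhile_imp hc

theorem pv_comm (l : List Char) :
    PySem.Chars.rstrip (PySem.Chars.lstrip l) = PySem.Chars.lstrip (PySem.Chars.rstrip l) := by
  obtain ⟨sp, hl, hsp⟩ := pv_rstrip_decomp l
  rcases pv_rstrip_last l with h0 | ⟨w, d, hwd, hd⟩
  · rw [h0] at hl
    simp only [List.nil_append] at hl
    rw [h0, hl, pv_lstrip_of_all_space hsp]
    rfl
  · rw [hwd] at hl
    have hls : PySem.Chars.lstrip l = PySem.Chars.lstrip w ++ [d] ++ sp := by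
      rw [hl, List.append_assoc, pv_lstrip_append w ([d] ++ sp)
        (by rw [List.singleton_append, pv_lstrip_cons_nonspace hd])]
      simp [List.append_assoc]
    rw [hls, hwd]
    rw [pv_rstrip_append (PySem.Chars.lstrip w ++ [d]) sp (pv_rstrip_concat_nonspace hd _),
      pv_rstrip_of_all_space hsp]
    rw [pv_lstrip_append w [d] (by
      rw [show [d] = d :: ([] : List Char) from rfl, pv_lstrip_cons_nonspace hd])]
    simp

theorem pv_strip_lstrip (l : List Char) :
    PySem.Chars.strip (PySem.Chars.lstrip l) = PySem.Chars.strip l := by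
  unfold PySem.Chars.strip
  rw [pv_lstrip_idem]

theorem pv_strip_rstrip (l : List Char) :
    PySem.Chars.strip (PySem.Chars.rstrip l) = PySem.Chars.strip l := by
  unfold PySem.Chars.strip
  rw [← pv_comm, pv_rstrip_idem, pv_comm]

theorem pv_strip_idem (l : List Char) :
    PySem.Chars.strip (PySem.Chars.strip l) = PySem.Chars.strip l := by
  show PySem.Chars.strip (PySem.Chars.rstrip (PySem.Chars.lstrip l)) = _
  rw [pv_strip_rstrip, pv_strip_lstrip]

theorem pv_comma_nonspace : PySem.Chars.isspace ',' = false := rfl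

theorem pv_strip_decomp (bc ac : List Char) :
    PySem.Chars.strip (bc ++ ',' :: ac) =
      PySem.Chars.lstrip bc ++ ',' :: PySem.Chars.rstrip ac := by
  unfold PySem.Chars.strip
  rw [pv_lstrip_append bc (',' :: ac) (pv_lstrip_cons_nonspace pv_comma_nonspace ac)]
  rw [show PySem.Chars.lstrip bc ++ ',' :: ac = (PySem.Chars.lstrip bc ++ [',']) ++ ac by simp]
  rw [pv_rstrip_append _ _ (pv_rstrip_concat_nonspace pv_comma_nonspace _)]
  simp

theorem pv_strip_sublist (l : List Char) : (PySem.Chars.strip l).Sublist l := by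
  have h1 : (PySem.Chars.rstrip (PySem.Chars.lstrip l)).Sublist (PySem.Chars.lstrip l) := by
    obtain ⟨sp, hl, _⟩ := pv_rstrip_decomp (PySem.Chars.lstrip l)
    conv_rhs => rw [hl]
    exact List.sublist_append_left _ _
  have h2 : (PySem.Chars.lstrip l).Sublist l := (List.dropWhile_suffix _).sublist
  exact h1.trans h2

-- ---- singleton startswith / endswith / isIn ----
theorem pv_startswith_singleton (s : List Char) (p : Char) :
    PySem.Chars.startswith s [p] = true ↔ s.head? = some p := by
  cases s with
  | nil => simp [PySem.Chars.startswith, List.isPrefixOf]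
  | cons c t =>
    simp only [PySem.Chars.startswith]
    rw [show List.isPrefixOf [p] (c :: t) = (p == c && List.isPrefixOf [] t) from rfl]
    simp only [List.isPrefixOf_nil_left, Bool.and_true, beq_iff_eq, List.head?_cons,
      Option.some.injEq]
    exact eq_comm

theorem pv_endswith_singleton (s : List Char) (p : Char) :
    PySem.Chars.endswith s [p] = true ↔ s.getLast? = some p := by
  rw [show PySem.Chars.endswith s [p] = PySem.Chars.startswith s.reverse [p] by
    simp [PySem.Chars.endswith, PySem.Chars.startswith, List.isSuffixOf]]
  rw [pv_startswith_singleton, List.head?_reverse]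

theorem pv_isIn_comma (s : List Char) :
    PySem.Chars.isIn [','] s = true ↔ ',' ∈ s := by
  rw [PySem.Chars.isIn_iff_infix, List.singleton_infix_iff]

theorem pv_first_comma {j : List Char} (h : ',' ∈ j) :
    ∃ bc ac, j = bc ++ ',' :: ac ∧ ',' ∉ bc := by
  induction j with
  | nil => simp at h
  | cons c r ih =>
    by_cases hc : c = ','
    · subst hc
      exact ⟨[], r, rfl, by simp⟩
    · have hr : ',' ∈ r := by
        rcases List.mem_cons.mp h with h' | h'
        · exact absurd h'.symm hc
        · exact h'
      obtain ⟨bc, ac, he, hn⟩ := ih hr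
      refine ⟨c :: bc, ac, by rw [he]; rfl, ?_⟩
      intro hm
      rcases List.mem_cons.mp hm with h' | h'
      · exact hc h'.symm
      · exact hn h'

-- ---- branch-condition transfer lemmas ----
theorem pv_sw_first (bc ac : List Char) :
    PySem.Chars.startswith (PySem.Chars.strip (bc ++ ',' :: ac)) ['{'] =
      PySem.Chars.startswith (PySem.Chars.strip bc) ['{'] := by
  rw [pv_strip_decomp]
  rcases pv_lstrip_head bc with h | ⟨d, t, h, hd⟩
  · rw [h]
    have h2 : PySem.Chars.strip bc = [] := by
      unfold PySem.Chars.strip; rw [h]; rfl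
    rw [h2]
    simp only [List.nil_append]
    rw [Bool.eq_iff_iff, pv_startswith_singleton, pv_startswith_singleton]
    simp
  · have h2 : PySem.Chars.strip bc = d :: PySem.Chars.rstrip t := by
      unfold PySem.Chars.strip
      rw [h, show d :: t = [d] ++ t from rfl,
        pv_rstrip_append [d] t (pv_rstrip_concat_nonspace hd [])]
      rfl
    rw [h, h2, Bool.eq_iff_iff, pv_startswith_singleton, pv_startswith_singleton]
    simp

theorem pv_ew_last (bc ac : List Char) :
    PySem.Chars.endswith (PySem.Chars.strip (bc ++ ',' :: ac)) ['}'] =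
      PySem.Chars.endswith (PySem.Chars.strip ac) ['}'] := by
  rw [pv_strip_decomp]
  have hstrip : PySem.Chars.strip ac = PySem.Chars.lstrip (PySem.Chars.rstrip ac) := pv_comm ac
  rcases pv_rstrip_last ac with h | ⟨w, d, h, hd⟩
  · rw [h, hstrip, h]
    rw [Bool.eq_iff_iff, pv_endswith_singleton, pv_endswith_singleton]
    simp [PySem.Chars.lstrip, List.getLast?_append]
  · have h2 : PySem.Chars.strip ac = PySem.Chars.lstrip w ++ [d] := by
      rw [hstrip, h, pv_lstrip_append w [d]
        (by rw [show [d] = d :: ([] : List Char) from rfl, pv_lstrip_cons_nonspace hd])]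
    rw [h, h2, Bool.eq_iff_iff, pv_endswith_singleton, pv_endswith_singleton]
    rw [show PySem.Chars.lstrip bc ++ ',' :: (w ++ [d])
          = (PySem.Chars.lstrip bc ++ ',' :: w) ++ [d] by simp]
    rw [List.getLast?_concat, List.getLast?_concat]

-- ---- A depends on its argument only through strip ----
theorem pvAGoC_strip (fuel : Nat) (c : List Char) :
    pvAGoC fuel (PySem.Chars.strip c) = pvAGoC fuel c := by
  cases fuel with
  | zero => rfl
  | succ n => simp only [pvAGoC, pv_strip_idem]

-- ---- the brace-branch fold appends onto its accumulator ----
theorem pv_foldl_acc (f : List Char → List Char) (items : List (List Char))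
    (acc : List (List Char)) :
    items.foldl (fun names item => if f item = [] then names else names ++ [f item]) acc
      = acc ++ items.foldl (fun names item => if f item = [] then names else names ++ [f item]) [] := by
  induction items generalizing acc with
  | nil => simp
  | cons x xs ih =>
    simp only [List.foldl_cons]
    by_cases h : f x = []
    · rw [if_pos h, if_pos h]; exact ih acc
    · rw [if_neg h, if_neg h, ih (acc ++ [f x]), ih ([] ++ [f x])]
      simp

-- ---- main loop correspondence: B's scan over the segments = A's recursion ----
theorem pv_ML : ∀ (fuel : Nat) (j : List Char) (acc : List (List Char)), j.length < fuel →
    pvBGoC (pvSplAux [] j) (PySem.Chars.endswith (PySem.Chars.strip j) ['}']) acc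
      = acc ++ pvAGoC fuel j := by
  intro fuel
  induction fuel with
  | zero => intro j acc h; omega
  | succ f ih =>
    intro j acc h
    by_cases hc : ',' ∈ j
    · obtain ⟨bc, ac, rfl, hbc⟩ := pv_first_comma hc
      rw [pvSplAux_append bc hbc [] ac]
      simp only [List.nil_append]
      cases e : pvSplAux [] ac with
      | nil => exact absurd e (pvSplAux_ne_nil ac [])
      | cons sh st =>
      rw [pvBGoC]
      -- B's brace condition equals A's
      rw [show PySem.Chars.startswith (PySem.Chars.strip bc) ['{'] =
            PySem.Chars.startswith (PySem.Chars.strip (bc ++ ',' :: ac)) ['{'] from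
            (pv_sw_first bc ac).symm]
      by_cases hbrace : (PySem.Chars.startswith (PySem.Chars.strip (bc ++ ',' :: ac)) ['{']
          && PySem.Chars.endswith (PySem.Chars.strip (bc ++ ',' :: ac)) ['}']) = true
      · rw [if_pos hbrace]
        have hjoin : PySem.Chars.join [','] (bc :: sh :: st) = bc ++ ',' :: ac := by
          have h1 := pv_join_pvSplAux (bc ++ ',' :: ac) []
          rw [pvSplAux_append bc hbc [] ac, e] at h1
          simpa using h1
        rw [hjoin]
        rw [pvAGoC]
        simp only [hbrace, if_pos]
        exact pv_foldl_acc _ _ acc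
      · rw [if_neg hbrace]
        have hin : PySem.Chars.isIn [','] (PySem.Chars.strip (bc ++ ',' :: ac)) = true := by
          rw [pv_isIn_comma, pv_strip_decomp]
          simp
        -- A's step
        rw [pvAGoC]
        simp only [hbrace, Bool.false_eq_true, if_false, hin, if_pos]
        have hsplit : (PySem.Chars.splitMax? (PySem.Chars.strip (bc ++ ',' :: ac)) [','] 1).getD []
            = [PySem.Chars.lstrip bc, PySem.Chars.rstrip ac] := by
          rw [PySem.Chars.splitMax?]
          simp only [List.isEmpty_cons, Option.getD_some, if_false, Bool.false_eq_true]
          rw [pv_splitOnMax1_eq, pv_strip_decomp]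
          refine pvSpl1Aux_append (PySem.Chars.lstrip bc) ?_ [] (PySem.Chars.rstrip ac)
          intro hm
          exact hbc ((List.dropWhile_suffix _).subset hm)
        rw [hsplit]
        simp only [List.getD_cons_zero, List.getD_cons_succ]
        -- B's step: continue with the remaining segments
        rw [← e]
        rw [show PySem.Chars.endswith (PySem.Chars.strip (bc ++ ',' :: ac)) ['}'] =
              PySem.Chars.endswith (PySem.Chars.strip ac) ['}'] from pv_ew_last bc ac]
        have hlen : ac.length < f := by
          have h' := h
          simp only [List.length_append, List.length_cons] at h'
          omega
        rw [ih ac _ hlen]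
        -- align the two appended names
        rw [pv_strip_lstrip bc]
        have hnamed : pvAGoC f (PySem.Chars.strip (PySem.Chars.rstrip ac)) = pvAGoC f ac := by
          rw [pv_strip_rstrip, pvAGoC_strip]
        rw [hnamed]
        split_ifs <;> simp
    · rw [pvSplAux_no_comma j [] hc]
      simp only [List.nil_append]
      rw [pvBGoC]
      by_cases hbrace : (PySem.Chars.startswith (PySem.Chars.strip j) ['{']
          && PySem.Chars.endswith (PySem.Chars.strip j) ['}']) = true
      · rw [if_pos hbrace]
        rw [PySem.Chars.join_singleton]
        rw [pvAGoC]
        simp only [hbrace, if_pos]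
        exact pv_foldl_acc _ _ acc
      · rw [if_neg hbrace]
        have hin : PySem.Chars.isIn [','] (PySem.Chars.strip j) = false := by
          rw [Bool.eq_false_iff]
          intro habs
          exact hc ((pv_strip_sublist j).subset ((pv_isIn_comma _).mp habs))
        rw [pvAGoC]
        simp only [hbrace, Bool.false_eq_true, if_false, hin]
        split_ifs <;> simp

-- ===== VERDICT (by name: the statement is the Claim_ definition above) =====
theorem extract_js_import_names_py_spec : Claim_equal_extract_js_import_names_py := by
  intro clause _
  unfold Spec_extract_js_import_names_py extract_js_import_names_py extract_js_import_names_py_alt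
  congr 1
  have hsplit : (PySem.Chars.split? (PySem.Chars.strip clause.toList) [',']).getD []
      = pvSplAux [] (PySem.Chars.strip clause.toList) := by
    rw [PySem.Chars.split?]
    simp only [List.isEmpty_cons, Bool.false_eq_true, if_false, Option.getD_some]
    exact pv_splitOn_eq _
  simp only [hsplit]
  rw [show PySem.Chars.endswith (PySem.Chars.strip clause.toList) ['}'] =
        PySem.Chars.endswith (PySem.Chars.strip (PySem.Chars.strip clause.toList)) ['}'] by
      rw [pv_strip_idem]]
  rw [pv_ML (clause.toList.length + 1) (PySem.Chars.strip clause.toList) []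
    (by have := (pv_strip_sublist clause.toList).length_le; omega)]
  rw [pvAGoC_strip]
  simp
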